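-- pv_equiv track=rewrite | github.com/pmdevita/pkmn3save | pkmn3save/data_types/pokemon.py | iterate_sub
-- ===== SOURCE A (Python) =====
-- def iterate_sub(word: str, letters: list[str]):
--     results = []
--     if len(letters) == 1:
--         return [word + letters[0]]
--
--     for i in letters:
--         new_list = letters[:]
--         new_list.remove(i)
--         results.extend(iterate_sub(word + i, new_list))
--     return results
-- ===== SOURCE B (Python) =====
-- def iterate_sub(word: str, letters: list[str]):
--     # Dynamic programming over remaining-letter tuples: the block of suffixes
--     # produced below a given remaining list is independent of the prefix built
--     # so far, so it is computed once and cached; `word` is prepended at the top.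
--     memo = {}
--
--     def suffixes(rem):
--         if rem in memo:
--             return memo[rem]
--         if len(rem) == 1:
--             result = [rem[0]]
--         else:
--             result = []
--             for x in rem:
--                 lst = list(rem)
--                 lst.remove(x)
--                 for s in suffixes(tuple(lst)):
--                     result.append(x + s)
--         memo[rem] = result
--         return result
--
--     if not letters:
--         return []
--     return [word + s for s in suffixes(tuple(letters))]
-- ===== Notes on version B (the rewrite author's own statement) =====
-- stated objective: alternative
-- what changed: Replaces A's naive recursion (each call copies/removes from the list and rebuilds every prefix incrementally) by memoized dynamic programming: suffix blocks are keyed by the remaining-letter tuple, computed once, cached in a dict and shared, with the word prepended once at the top; same n! results in the same order.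
import Mathlib
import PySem

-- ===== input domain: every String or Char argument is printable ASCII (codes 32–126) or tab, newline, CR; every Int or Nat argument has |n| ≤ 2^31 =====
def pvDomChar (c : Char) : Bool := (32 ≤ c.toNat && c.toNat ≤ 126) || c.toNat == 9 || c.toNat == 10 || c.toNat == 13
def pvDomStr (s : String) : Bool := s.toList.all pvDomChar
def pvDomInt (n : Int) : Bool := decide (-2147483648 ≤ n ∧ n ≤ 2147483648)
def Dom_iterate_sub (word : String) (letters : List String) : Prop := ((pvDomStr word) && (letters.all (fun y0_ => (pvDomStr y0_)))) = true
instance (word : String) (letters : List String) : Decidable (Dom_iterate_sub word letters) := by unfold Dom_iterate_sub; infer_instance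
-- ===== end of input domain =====

-- B replaces A's naive recursion by memoized dynamic programming over the remaining-letter
-- list (suffix blocks are prefix-independent, computed once and cached); same output, same order.

-- ===== PORT A =====
-- list.remove(v) with v known to be present (the `none` arm is an unreachable totality guard)
def pvRemove (xs : List String) (v : String) : List String :=
  match PySem.List.remove? xs v with
  | some r => r
  | none => xs

theorem pvRemove_length_of_mem {xs : List String} {v : String} (h : v ∈ xs) :
    (pvRemove xs v).length + 1 = xs.length := by
  unfold pvRemove
  rw [PySem.List.remove?_eq_some_erase xs v h]
  show (xs.erase v).length + 1 = xs.length
  have := List.length_erase_of_mem h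
  have hpos : 0 < xs.length := List.length_pos_of_mem h
  omega

def iterate_sub (word : String) (letters : List String) : List String :=
  if letters.length == 1 then
    [word ++ (PySem.List.pyGet? letters 0).getD ""]
  else
    letters.attach.foldl
      (fun results i =>
        results ++ iterate_sub (word ++ i.1) (pvRemove letters i.1)) []
termination_by letters.length
decreasing_by
  have := pvRemove_length_of_mem i.2
  omega

-- ===== PORT B =====
-- `suffixes(rem)` of Source B: the closure threads the memo dict explicitly here
def pvSuffixes (rem : List String) (memo : PySem.Dict (List String) (List String)) :
    List String × PySem.Dict (List String) (List String) :=
  match PySem.Dict.get? memo rem with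
  | some v => (v, memo)
  | none =>
    let r :=
      if rem.length == 1 then
        (([(PySem.List.pyGet? rem 0).getD ""] : List String), memo)
      else
        rem.attach.foldl
          (fun acc x =>
            let lst := pvRemove rem x.1
            let p := pvSuffixes lst acc.2
            (acc.1 ++ p.1.map (fun s => x.1 ++ s), p.2))
          (([] : List String), memo)
    (r.1, PySem.Dict.insert r.2 rem r.1)
termination_by rem.length
decreasing_by
  have := pvRemove_length_of_mem x.2
  omega

def iterate_sub_alt (word : String) (letters : List String) : List String :=
  if letters.isEmpty then []
  else (pvSuffixes letters PySem.Dict.empty).1.map (fun s => word ++ s)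

-- ===== PRECONDITION & SPEC =====
def Spec_iterate_sub (word : String) (letters : List String) (out : List String) : Prop := out = iterate_sub_alt word letters
instance (word : String) (letters : List String) (out : List String) : Decidable (Spec_iterate_sub word letters out) := by unfold Spec_iterate_sub; infer_instance

-- ===== CLAIM (what is proved, stated in full; the proofs are below) =====
def Claim_equal_iterate_sub : Prop := ∀ (word : String) (letters : List String), Dom_iterate_sub word letters → Spec_iterate_sub word letters (iterate_sub word letters)

-- ===== LEMMAS AND PROOFS =====

-- pure (memo-free) specification of pvSuffixes
def pvSfx (rem : List String) : List String :=
  if rem.length == 1 then [(PySem.List.pyGet? rem 0).getD ""]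
  else rem.attach.flatMap (fun x => (pvSfx (pvRemove rem x.1)).map (fun s => x.1 ++ s))
termination_by rem.length
decreasing_by
  have := pvRemove_length_of_mem x.2
  omega

theorem flatMap_attach_eq {α β : Type} (l : List α) (f : α → List β) :
    l.attach.flatMap (fun x => f x.1) = l.flatMap f := by
  rw [← List.flatMap_map (fun x : {x // x ∈ l} => x.1) f l.attach, List.attach_map_subtype_val]

theorem pvSfx_of_ne_one {rem : List String} (h : rem.length ≠ 1) :
    pvSfx rem = rem.flatMap (fun x => (pvSfx (pvRemove rem x)).map (fun s => x ++ s)) := by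
  rw [pvSfx]
  simp only [beq_iff_eq, h, if_false]
  exact flatMap_attach_eq rem (fun x => (pvSfx (pvRemove rem x)).map (fun s => x ++ s))

theorem pvSfx_of_one {rem : List String} (h : rem.length = 1) :
    pvSfx rem = [(PySem.List.pyGet? rem 0).getD ""] := by
  rw [pvSfx]
  simp [h]

-- unfolding of A on a list of length ≠ 1 into a flatMap over its elements
theorem iterate_sub_flatMap (word : String) (letters : List String)
    (h : letters.length ≠ 1) :
    iterate_sub word letters
      = letters.flatMap (fun x => iterate_sub (word ++ x) (pvRemove letters x)) := by
  rw [iterate_sub]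
  simp only [beq_iff_eq, h, if_false]
  rw [List.foldl_attach (f := fun acc v => acc ++ iterate_sub (word ++ v) (pvRemove letters v)),
    PySem.List.foldl_append_eq_flatMap]
  simp

-- A's result is the word-prefixed suffix block
theorem iterate_sub_eq_map_sfx :
    ∀ (n : Nat) (rem : List String), rem.length ≤ n → rem ≠ [] →
      ∀ (w : String), iterate_sub w rem = (pvSfx rem).map (fun s => w ++ s) := by
  intro n
  induction n with
  | zero =>
    intro rem h hne
    exfalso
    cases rem with
    | nil => exact hne rfl
    | cons a t => simp at h
  | succ n ih =>
    intro rem hlen hne w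
    by_cases h1 : rem.length = 1
    · rw [iterate_sub, pvSfx_of_one h1]
      simp [h1]
    · have h0 : 0 < rem.length := List.length_pos_of_ne_nil hne
      rw [iterate_sub_flatMap w rem h1, pvSfx_of_ne_one h1, List.map_flatMap]
      apply List.flatMap_congr
      intro x hx
      have hrl := pvRemove_length_of_mem hx
      have hne' : pvRemove rem x ≠ [] := by
        intro hc
        apply h1
        rw [hc] at hrl
        simpa using hrl.symm
      rw [ih (pvRemove rem x) (by omega) hne' (w ++ x), List.map_map]
      apply List.map_congr_left
      intro s _
      simp [String.append_assoc]

-- memo invariant: every cached entry is the pure suffix block of its key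
def pvInv (memo : PySem.Dict (List String) (List String)) : Prop :=
  ∀ p ∈ memo.items, p.2 = pvSfx p.1

theorem pvInv_insert {memo : PySem.Dict (List String) (List String)}
    {k v : List String} (h : pvInv memo) (hv : v = pvSfx k) :
    pvInv (PySem.Dict.insert memo k v) := by
  intro p hp
  rcases (PySem.Dict.mem_items_insert memo k v p).1 hp with hp | hp
  · subst hp; exact hv
  · exact h p hp.1

theorem pvSuffixes_correct :
    ∀ (n : Nat) (rem : List String) (memo : PySem.Dict (List String) (List String)),
      rem.length ≤ n → pvInv memo →
      (pvSuffixes rem memo).1 = pvSfx rem ∧ pvInv (pvSuffixes rem memo).2 := by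
  intro n
  induction n with
  | zero =>
    intro rem memo hlen hInv
    have hrem : rem = [] := by cases rem with
      | nil => rfl
      | cons a t => simp at hlen
    subst hrem
    rw [pvSuffixes]
    cases hget : PySem.Dict.get? memo ([] : List String) with
    | some v =>
      exact ⟨hInv (([] : List String), v) (PySem.Dict.mem_items_of_get?_eq_some memo hget), hInv⟩
    | none =>
      simp only [List.length_nil, List.attach_nil, List.foldl_nil]
      have hbase : ([] : List String) = pvSfx ([] : List String) := by
        rw [pvSfx_of_ne_one (by simp)]
        simp
      exact ⟨by simpa using hbase, pvInv_insert hInv (by simpa using hbase)⟩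
  | succ n ih =>
    intro rem memo hlen hInv
    rw [pvSuffixes]
    cases hget : PySem.Dict.get? memo rem with
    | some v =>
      exact ⟨hInv (rem, v) (PySem.Dict.mem_items_of_get?_eq_some memo hget), hInv⟩
    | none =>
      by_cases h1 : rem.length = 1
      · rw [if_pos (by simp [h1])]
        have hbase : [(PySem.List.pyGet? rem 0).getD ""] = pvSfx rem := (pvSfx_of_one h1).symm
        exact ⟨hbase, pvInv_insert hInv hbase⟩
      · rw [if_neg (by simp [h1])]
        -- fold invariant over the elements of rem
        have key : ∀ (l : List {x // x ∈ rem}) (acc : List String)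
            (m : PySem.Dict (List String) (List String)), pvInv m →
            (l.foldl
              (fun acc x =>
                (acc.1 ++ (pvSuffixes (pvRemove rem x.1) acc.2).1.map (fun s => x.1 ++ s),
                 (pvSuffixes (pvRemove rem x.1) acc.2).2))
              (acc, m)).1
              = acc ++ l.flatMap (fun x => (pvSfx (pvRemove rem x.1)).map (fun s => x.1 ++ s))
            ∧ pvInv (l.foldl
              (fun acc x =>
                (acc.1 ++ (pvSuffixes (pvRemove rem x.1) acc.2).1.map (fun s => x.1 ++ s),
                 (pvSuffixes (pvRemove rem x.1) acc.2).2))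
              (acc, m)).2 := by
          intro l
          induction l with
          | nil => intro acc m hm; simp [hm]
          | cons x t iht =>
            intro acc m hm
            have hlt := pvRemove_length_of_mem x.2
            have hcall := ih (pvRemove rem x.1) m (by omega) hm
            simp only [List.foldl_cons, List.flatMap_cons, hcall.1]
            have hrest := iht (acc ++ (pvSfx (pvRemove rem x.1)).map (fun s => x.1 ++ s))
              (pvSuffixes (pvRemove rem x.1) m).2 hcall.2
            exact ⟨by rw [hrest.1, List.append_assoc], hrest.2⟩
        have hk := key rem.attach [] memo hInv
        have hres : (rem.attach.foldl
            (fun acc x =>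
              (acc.1 ++ (pvSuffixes (pvRemove rem x.1) acc.2).1.map (fun s => x.1 ++ s),
               (pvSuffixes (pvRemove rem x.1) acc.2).2))
            ([], memo)).1 = pvSfx rem := by
          rw [hk.1, List.nil_append,
            flatMap_attach_eq rem (fun x => (pvSfx (pvRemove rem x)).map (fun s => x ++ s)),
            ← pvSfx_of_ne_one h1]
        exact ⟨hres, pvInv_insert hk.2 hres⟩

-- ===== VERDICT (by name: the statement is the Claim_ definition above) =====
theorem iterate_sub_spec : Claim_equal_iterate_sub := by
  unfold Claim_equal_iterate_sub Spec_iterate_sub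
  intro word letters _
  unfold iterate_sub_alt
  by_cases hnil : letters = []
  · subst hnil
    rw [iterate_sub]
    simp
  · have hne : letters.isEmpty = false := by simpa [List.isEmpty_iff] using hnil
    rw [hne]
    simp only [Bool.false_eq_true, if_false]
    have hInv : pvInv PySem.Dict.empty := by
      intro p hp
      simp [PySem.Dict.empty] at hp
    have hc := pvSuffixes_correct letters.length letters PySem.Dict.empty le_rfl hInv
    rw [hc.1]
    exact iterate_sub_eq_map_sfx letters.length letters le_rfl hnil word
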